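-- pv_equiv track=rewrite | github.com/kalyanijha445/Maasika | app.py | _wrap_long_tokens
-- ===== SOURCE A (Python) =====
-- def _wrap_long_tokens(text, max_len=60):
--
--     out = []
--     for token in (text or "").split():
--         if len(token) <= max_len:
--             out.append(token)
--         else:
--             chunks = [token[i:i+max_len] for i in range(0, len(token), max_len)]
--             out.append(" ".join(chunks))
--     return " ".join(out)
-- ===== SOURCE B (Python) =====
-- def _wrap_long_tokens(text, max_len=60):
--     # Single character-level scan with a run counter: no split(), no slicing.
--     out = []
--     run = 0
--     for ch in (text or ""):
--         if ch.isspace():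
--             run = 0
--             continue
--         if run == max_len:
--             run = 0
--         if run == 0 and out:
--             out.append(" ")
--         out.append(ch)
--         run += 1
--     return "".join(out)
-- ===== Notes on version B (the rewrite author's own statement) =====
-- stated objective: alternative
-- what changed: Replaces split-into-tokens plus per-token slicing and two-level join by a single character-level state machine: one scan over the raw text with a run counter that resets on whitespace and inserts a separator space at token starts and every max_len characters.
-- outside the precondition, e.g. on _wrap_long_tokens('ab cd', -1): A returns ' ', B returns 'ab cd'
import Mathlib
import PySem

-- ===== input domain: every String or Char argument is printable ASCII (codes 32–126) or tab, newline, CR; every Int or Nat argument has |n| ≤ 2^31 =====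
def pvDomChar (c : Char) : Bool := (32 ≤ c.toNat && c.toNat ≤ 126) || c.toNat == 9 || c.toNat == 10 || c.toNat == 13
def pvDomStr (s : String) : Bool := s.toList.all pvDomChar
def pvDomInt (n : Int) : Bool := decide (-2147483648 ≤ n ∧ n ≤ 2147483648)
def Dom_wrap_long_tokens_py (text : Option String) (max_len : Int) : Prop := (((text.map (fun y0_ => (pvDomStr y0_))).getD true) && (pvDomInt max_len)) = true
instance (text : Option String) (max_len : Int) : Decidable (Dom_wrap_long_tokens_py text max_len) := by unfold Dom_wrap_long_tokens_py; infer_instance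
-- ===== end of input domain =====

-- B replaces A's split-into-tokens + per-token slicing + two-level join by a single character-level
-- state machine over the raw text (objective: alternative; same O(n) cost).

-- ===== PORT A =====
-- `(text or "")`: None and "" both give "" — Option.getD is exact here.
def wrap_long_tokens_py (text : Option String) (max_len : Int) : String :=
  let out : List String :=
    (PySem.Str.split₀ (text.getD "")).foldl
      (fun out token =>
        if (PySem.Str.len token : Int) ≤ max_len then
          out ++ [token]
        else
          let chunks : List String :=
            (PySem.List.pyRange 0 (PySem.Str.len token) max_len).map
              (fun i => PySem.Str.slice token (some i) (some (i + max_len)))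
          out ++ [PySem.Str.join " " chunks])
      []
  PySem.Str.join " " out

-- ===== PORT B =====
-- loop body of Source B: whitespace resets the run; otherwise wrap the run at max_len,
-- emit a separator space at a piece start (if anything was emitted), emit the char.
def pvStepB (max_len : Int) (st : List String × Int) (ch : Char) : List String × Int :=
  if PySem.Chars.isspace ch then (st.1, 0)
  else
    let run := if st.2 = max_len then 0 else st.2
    let out := if run = 0 ∧ st.1 ≠ [] then st.1 ++ [" "] else st.1
    (out ++ [String.ofList [ch]], run + 1)

def wrap_long_tokens_py_alt (text : Option String) (max_len : Int) : String :=
  PySem.Str.join "" (((text.getD "").toList).foldl (pvStepB max_len) ([], 0)).1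

-- ===== PRECONDITION & SPEC =====
-- Pre_ keeps the natural domain of a chunk width: max_len ≥ 1 (or a token-free text, where the
-- width is never used). At max_len = 0 A raises ValueError (range step 0) on any token; for
-- negative max_len A's inner range is empty, an accidental corner outside the function's purpose
-- (A emits bare separator spaces there while B returns the tokens).
def Pre_wrap_long_tokens_py (text : Option String) (max_len : Int) : Prop :=
  1 ≤ max_len ∨ PySem.Str.split₀ (text.getD "") = []
instance (text : Option String) (max_len : Int) : Decidable (Pre_wrap_long_tokens_py text max_len) := by unfold Pre_wrap_long_tokens_py; infer_instance

def pvWitness_wrap_long_tokens_py : Option String × Int := (some "hello worldwide", 4)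

def Spec_wrap_long_tokens_py (text : Option String) (max_len : Int) (out : String) : Prop := out = wrap_long_tokens_py_alt text max_len
instance (text : Option String) (max_len : Int) (out : String) : Decidable (Spec_wrap_long_tokens_py text max_len out) := by unfold Spec_wrap_long_tokens_py; infer_instance

-- ===== CLAIM (what is proved, stated in full; the proofs are below) =====
def Claim_equal_wrap_long_tokens_py : Prop := ∀ (text : Option String) (max_len : Int), Dom_wrap_long_tokens_py text max_len → Pre_wrap_long_tokens_py text max_len → Spec_wrap_long_tokens_py text max_len (wrap_long_tokens_py text max_len)

-- ===== LEMMAS AND PROOFS =====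

-- W m t r: the chars a single token's remaining characters t contribute, given r characters already
-- in the current chunk (a space precedes the char at a chunk boundary; r = 0 marks a piece start).
def pvW (m : Int) : List Char → Int → List Char
  | [], _ => []
  | c :: t, r => if r = m ∨ r = 0 then ' ' :: c :: pvW m t 1 else c :: pvW m t (r + 1)

-- the char-level state machine (B's semantics in the "something already emitted" regime)
def pvRecB (m : Int) : List Char → Int → List Char
  | [], _ => []
  | c :: s, r =>
    if PySem.Chars.isspace c then pvRecB m s 0
    else if r = m ∨ r = 0 then ' ' :: c :: pvRecB m s 1 else c :: pvRecB m s (r + 1)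

def pvJoin (outs : List String) : List Char := (outs.map String.toList).flatten

lemma pv_split0_go_ne_nil (s cur : List Char) (acc : List (List Char))
    (hacc : ∀ t ∈ acc, t ≠ []) : ∀ t ∈ PySem.Chars.split₀.go s cur acc, t ≠ [] := by
  induction s generalizing cur acc with
  | nil =>
    intro t ht
    by_cases hc : cur.isEmpty
    · simp [PySem.Chars.split₀.go, hc] at ht
      exact hacc t (by simpa using ht)
    · simp [PySem.Chars.split₀.go, hc] at ht
      rcases ht with h | h
      · exact hacc t (by simpa using h)
      · subst h; simpa using fun h' => hc (by simp [h'])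
  | cons c rest ih =>
    intro t ht
    by_cases hs : PySem.Chars.isspace c
    · by_cases hc : cur.isEmpty
      · simp only [PySem.Chars.split₀.go, hs, hc, if_true] at ht
        exact ih [] acc hacc t ht
      · simp only [PySem.Chars.split₀.go, hs, hc, if_true] at ht
        refine ih [] (cur.reverse :: acc) ?_ t ht
        intro u hu
        rcases List.mem_cons.mp hu with h | h
        · subst h; simpa using fun h' => hc (by simp [h'])
        · exact hacc u h
    · simp only [PySem.Chars.split₀.go, hs] at ht
      exact ih (c :: cur) acc hacc t ht

-- B-side bridging: the fold with a nonempty accumulator emits pvRecB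
lemma pv_foldB_ne (m : Int) (s : List Char) : ∀ (out : List String) (r : Int), out ≠ [] →
    pvJoin (s.foldl (pvStepB m) (out, r)).1 = pvJoin out ++ pvRecB m s r := by
  induction s with
  | nil => intro out r _; simp [pvRecB]
  | cons c s ih =>
    intro out r hout
    by_cases hs : PySem.Chars.isspace c
    · simp only [List.foldl_cons, pvStepB, hs, if_true]
      rw [ih out 0 hout]
      simp [pvRecB, hs]
    · by_cases hb : (if r = m then 0 else r) = 0
      · have hbranch : r = m ∨ r = 0 := by
          by_cases h : r = m
          · exact Or.inl h
          · right; simpa [h] using hb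
        simp only [List.foldl_cons, pvStepB, hs, if_neg hs, hb, hout,
          ne_eq, not_false_iff, and_true, if_true]
        rw [ih _ _ (by simp)]
        simp [pvRecB, hs, hbranch, pvJoin, String.toList_ofList]
      · have hbranch : ¬ (r = m ∨ r = 0) := by
          rintro (h | h) <;> simp [h] at hb
        have hrm : r ≠ m := fun h => hbranch (Or.inl h)
        have hr0 : r ≠ 0 := fun h => hbranch (Or.inr h)
        simp only [List.foldl_cons, pvStepB, hs, if_neg hs, if_neg hrm, hr0,
          false_and, if_false]
        rw [ih _ _ (by simp [hout])]
        simp [pvRecB, hs, hbranch, pvJoin, String.toList_ofList]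

-- B-side: from the empty accumulator the result is pvRecB minus its leading space
lemma pv_foldB_nil (m : Int) (s : List Char) :
    pvJoin (s.foldl (pvStepB m) ([], 0)).1 = (pvRecB m s 0).tail := by
  induction s with
  | nil => simp [pvRecB, pvJoin]
  | cons c s ih =>
    by_cases hs : PySem.Chars.isspace c
    · simp only [List.foldl_cons, pvStepB, hs, if_true]
      rw [ih]; simp [pvRecB, hs]
    · have hstep : pvStepB m ([], 0) c = ([String.ofList [c]], 1) := by
        simp [pvStepB, hs, ite_self]
      rw [List.foldl_cons, hstep, pv_foldB_ne m s [String.ofList [c]] 1 (by simp)]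
      simp [pvRecB, hs, pvJoin, String.toList_ofList]

-- pvW consumes a block of ≤ m - r chars without a break
lemma pv_W_block (m : Int) (a : List Char) : ∀ (u : List Char) (r : Int), 1 ≤ r →
    r + (a.length : Int) ≤ m → pvW m (a ++ u) r = a ++ pvW m u (r + a.length) := by
  induction a with
  | nil => intro u r _ _; simp
  | cons c a ih =>
    intro u r h1 h2
    have hlen : ((c :: a).length : Int) = (a.length : Int) + 1 := by
      push_cast [List.length_cons]; ring
    rw [hlen] at h2
    have hne : ¬ (r = m ∨ r = 0) := by
      have : (0 : Int) ≤ a.length := by positivity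
      rintro (h | h) <;> omega
    rw [List.cons_append, pvW, if_neg hne, ih u (r + 1) (by omega) (by omega)]
    simp only [List.cons_append, List.length_cons]
    congr 2
    push_cast [List.length_cons]; ring

lemma pv_pyRange_cons_step (L m : Int) (hL : 0 < L) (hm : 1 ≤ m) :
    PySem.List.pyRange 0 L m = 0 :: (PySem.List.pyRange 0 (L - m) m).map (· + m) := by
  rw [PySem.List.pyRange_of_pos 0 L (by omega), PySem.List.pyRange_of_pos 0 (L - m) (by omega)]
  have hcnt : ((L - 0 + m - 1) / m).toNat = ((if 0 < L - m then ((L - m - 0 + m - 1) / m).toNat else 0)) + 1 := by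
    by_cases h : 0 < L - m
    · rw [if_pos h]
      have e1 : L - 0 + m - 1 = (L - 1) + 1 * m := by ring
      have e2 : L - m - 0 + m - 1 = L - 1 := by ring
      rw [e1, e2, Int.add_mul_ediv_right _ _ (by omega : m ≠ 0)]
      have hpos : 0 ≤ (L - 1) / m := Int.ediv_nonneg (by omega) (by omega)
      omega
    · rw [if_neg h]
      have e1 : L - 0 + m - 1 = (L - 1) + 1 * m := by ring
      rw [e1, Int.add_mul_ediv_right _ _ (by omega : m ≠ 0),
        Int.ediv_eq_zero_of_lt (by omega) (by omega)]
      simp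
  rw [if_pos (by omega), hcnt, List.range_succ_eq_map]
  simp only [List.map_cons, List.map_map, Nat.cast_zero, mul_zero, add_zero, zero_add]
  congr 1
  apply List.map_congr_left
  intro k _
  simp only [Function.comp_apply]
  push_cast; ring

lemma pv_pyRange_singleton (L m : Int) (h1 : 0 < L) (h2 : L ≤ m) :
    PySem.List.pyRange 0 L m = [0] := by
  rw [PySem.List.pyRange_of_pos 0 L (by omega)]
  have hcnt : (L - 0 + m - 1) / m = 1 := by
    have : L - 0 + m - 1 = (L - 1) + 1 * m := by ring
    rw [this, Int.add_mul_ediv_right _ _ (by omega : m ≠ 0),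
        Int.ediv_eq_zero_of_lt (by omega) (by omega)]
    norm_num
  rw [if_pos (by omega), hcnt]
  simp

lemma pv_pyRange_ne_nil (L m : Int) (h1 : 0 < L) (hm : 1 ≤ m) :
    PySem.List.pyRange 0 L m ≠ [] := by
  intro h
  have h0 : (0 : Int) ∈ PySem.List.pyRange 0 L m := by
    rw [PySem.List.mem_pyRange_iff_of_pos (by omega)]
    exact ⟨le_refl 0, by omega, by simp⟩
  rw [h] at h0
  simp at h0

-- pvW on a leading block of ≤ m chars: one separator space, then the block
lemma pv_W_chunk (m : Int) (a u : List Char) (ha : a ≠ []) (hlen : (a.length : Int) ≤ m) :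
    pvW m (a ++ u) 0 = ' ' :: a ++ pvW m u (a.length : Int) := by
  cases a with
  | nil => exact absurd rfl ha
  | cons c a' =>
    have h2 : (1 : Int) + (a'.length : Int) ≤ m := by
      push_cast [List.length_cons] at hlen ⊢; omega
    rw [List.cons_append, pvW, if_pos (Or.inr rfl),
        pv_W_block m a' u 1 (by omega) h2]
    simp only [List.cons_append, List.length_cons]
    congr 3
    push_cast; ring

lemma pv_W_m_eq_zero (m : Int) (u : List Char) (hu : u ≠ []) :
    pvW m u m = pvW m u 0 := by
  cases u with
  | nil => exact absurd rfl hu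
  | cons d u' => simp [pvW]

lemma pv_W_head (m : Int) (t : List Char) (ht : t ≠ []) :
    pvW m t 0 = ' ' :: (pvW m t 0).tail := by
  cases t with
  | nil => exact absurd rfl ht
  | cons c t' => simp [pvW]

lemma pv_intercalate_cons₂ {α : Type} (sep : List α) (a b : List α) (l : List (List α)) :
    sep.intercalate (a :: b :: l) = a ++ sep ++ sep.intercalate (b :: l) := by
  simp [List.intercalate]

-- A's slice comprehension decomposes: first chunk, then the comprehension on the dropped rest
lemma pv_chunk_map (m : Int) (hm : 1 ≤ m) (t : List Char) (hlt : m < (t.length : Int)) :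
    (PySem.List.pyRange 0 (t.length : Int) m).map
        (fun i => PySem.List.slice t (some i) (some (i + m)))
      = t.take m.toNat ::
        (PySem.List.pyRange 0 ((t.drop m.toNat).length : Int) m).map
          (fun i => PySem.List.slice (t.drop m.toNat) (some i) (some (i + m))) := by
  have hrange : ((t.drop m.toNat).length : Int) = (t.length : Int) - m := by
    simp [List.length_drop]; omega
  rw [hrange, pv_pyRange_cons_step ((t.length : Int)) m (by omega) hm, List.map_cons, List.map_map]
  congr 1
  · rw [zero_add, PySem.List.slice_zero_start, PySem.List.slice_to t (by omega)]
  · apply List.map_congr_left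
    intro i hi
    have h0i : 0 ≤ i := ((PySem.List.mem_pyRange_iff_of_pos (by omega : (0:Int) < m) i).mp hi).1
    simp only [Function.comp_apply]
    rw [PySem.List.slice_toNat t (by omega) (by omega),
        PySem.List.slice_toNat (t.drop m.toNat) h0i (by omega)]
    have e1 : (i + m).toNat = i.toNat + m.toNat := by omega
    rw [e1]
    have e2 : (i + m + m).toNat - (i.toNat + m.toNat) = m.toNat := by omega
    have e3 : i.toNat + m.toNat - i.toNat = m.toNat := by omega
    rw [e2, e3, List.drop_drop, Nat.add_comm i.toNat m.toNat]

lemma pv_chunks_eq_tail_W (m : Int) (hm : 1 ≤ m) : ∀ (n : Nat) (t : List Char), t.length ≤ n → t ≠ [] →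
    List.intercalate [' ']
      ((PySem.List.pyRange 0 (t.length : Int) m).map
        (fun i => PySem.List.slice t (some i) (some (i + m))))
      = (pvW m t 0).tail := by
  intro n
  induction n with
  | zero => intro t h ht; cases t with | nil => exact absurd rfl ht | cons c t' => simp at h
  | succ n ih =>
    intro t hn ht
    have hL : 0 < t.length := List.length_pos_iff.mpr ht
    by_cases hLm : (t.length : Int) ≤ m
    · rw [pv_pyRange_singleton _ m (by exact_mod_cast hL) hLm]
      have hsl : PySem.List.slice t none (some m) = t := by
        rw [PySem.List.slice_to t (by omega)]
        exact List.take_of_length_le (by omega)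
      have hW : pvW m (t ++ []) 0 = ' ' :: t ++ pvW m [] (t.length : Int) :=
        pv_W_chunk m t [] ht hLm
      simp only [List.append_nil] at hW
      simp [hsl, List.intercalate, hW, pvW]
    · -- long token: peel the first chunk
      have hmN : (m.toNat : Int) = m := Int.toNat_of_nonneg (by omega)
      set u := t.drop m.toNat with hu
      have hulen : u.length = t.length - m.toNat := by simp [hu]
      have humem : u ≠ [] := by
        have : 0 < u.length := by rw [hulen]; omega
        exact List.length_pos_iff.mp this
      have htklen : (t.take m.toNat).length = m.toNat := by
        rw [List.length_take]; omega
      have htk : t.take m.toNat ≠ [] := by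
        have : 0 < (t.take m.toNat).length := by rw [htklen]; omega
        exact List.length_pos_iff.mp this
      rw [pv_chunk_map m hm t (by omega)]
      have hIH := ih u (by rw [hulen]; omega) humem
      have hne : (PySem.List.pyRange 0 ((u.length : Nat) : Int) m).map
          (fun i => PySem.List.slice u (some i) (some (i + m))) ≠ [] := by
        intro h
        exact pv_pyRange_ne_nil ((u.length : Nat) : Int) m
          (by exact_mod_cast List.length_pos_iff.mpr humem) hm (by simpa using h)
      rcases hcu : (PySem.List.pyRange 0 ((u.length : Nat) : Int) m).map
          (fun i => PySem.List.slice u (some i) (some (i + m))) with _ | ⟨b, l⟩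
      · exact absurd hcu hne
      · rw [pv_intercalate_cons₂]
        rw [hcu] at hIH
        rw [hIH]
        -- right-hand side
        have hsplit : t = t.take m.toNat ++ u := (List.take_append_drop m.toNat t).symm
        have hW : pvW m t 0 = ' ' :: t.take m.toNat ++ pvW m u (((t.take m.toNat).length : Nat) : Int) := by
          conv_lhs => rw [hsplit]
          exact pv_W_chunk m (t.take m.toNat) u htk (by rw [htklen]; omega)
        rw [hW]
        have : (((t.take m.toNat).length : Nat) : Int) = m := by rw [htklen]; omega
        rw [this, pv_W_m_eq_zero m u humem, pv_W_head m u humem]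
        simp

-- the split₀ recursion, generically: running tokens contribute pvW pieces
lemma pv_go_flat (m : Int) (s : List Char) : ∀ (cur : List Char) (acc : List (List Char)) (r : Int),
    (∀ u : List Char, pvW m (cur.reverse ++ u) 0 = pvW m cur.reverse 0 ++ pvW m u r) →
    ((PySem.Chars.split₀.go s cur acc).flatMap (fun t => pvW m t 0))
      = (acc.reverse.flatMap (fun t => pvW m t 0))
        ++ (if cur.isEmpty then [] else pvW m cur.reverse 0) ++ pvRecB m s r := by
  induction s with
  | nil =>
    intro cur acc r _
    by_cases hc : cur.isEmpty
    · have hcur : cur = [] := by simpa [List.isEmpty_iff] using hc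
      simp [PySem.Chars.split₀.go, hc, hcur, pvRecB]
    · simp [PySem.Chars.split₀.go, hc, pvRecB, List.flatMap_append]
  | cons c rest ih =>
    intro cur acc r hHr
    by_cases hs : PySem.Chars.isspace c
    · by_cases hc : cur.isEmpty
      · have hcur : cur = [] := by simpa [List.isEmpty_iff] using hc
        simp only [PySem.Chars.split₀.go, hs, if_true, hc]
        rw [ih [] acc 0 (by intro u; simp [pvW])]
        simp [hcur, pvRecB, hs]
      · simp only [PySem.Chars.split₀.go, hs, if_true, if_neg hc]
        rw [ih [] (cur.reverse :: acc) 0 (by intro u; simp [pvW])]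
        simp [pvRecB, hs, hc, List.flatMap_append]
    · rw [show PySem.Chars.split₀.go (c :: rest) cur acc
          = PySem.Chars.split₀.go rest (c :: cur) acc from by
        simp [PySem.Chars.split₀.go, hs]]
      have hstep : pvW m [c] r = if r = m ∨ r = 0 then [' ', c] else [c] := by
        by_cases hr : r = m ∨ r = 0 <;> simp [pvW, hr]
      have hHr' : ∀ u : List Char, pvW m ((c :: cur).reverse ++ u) 0
          = pvW m (c :: cur).reverse 0 ++ pvW m u (if r = m ∨ r = 0 then 1 else r + 1) := by
        intro u
        have h1 := hHr (c :: u)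
        have h2 := hHr [c]
        simp only [List.reverse_cons, List.append_assoc, List.singleton_append] at h1 h2 ⊢
        rw [h1, h2]
        by_cases hr : r = m ∨ r = 0 <;> simp [pvW, hr]
      rw [ih (c :: cur) acc _ hHr']
      have hsplitW : pvW m (c :: cur).reverse 0
          = (if cur.isEmpty then [] else pvW m cur.reverse 0) ++ pvW m [c] r := by
        have h2 := hHr [c]
        by_cases hc : cur.isEmpty
        · have hcur : cur = [] := by simpa [List.isEmpty_iff] using hc
          subst hcur
          simpa [pvW] using h2
        · have hne : cur ≠ [] := by simpa [List.isEmpty_iff] using hc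
          simpa [hne] using h2
      have hrecb : pvRecB m (c :: rest) r
          = (if r = m ∨ r = 0 then [' ', c] else [c])
            ++ pvRecB m rest (if r = m ∨ r = 0 then 1 else r + 1) := by
        by_cases hr : r = m ∨ r = 0 <;> simp [pvRecB, hs, hr]
      rw [hrecb, hsplitW, hstep]
      simp

-- assemble: intercalate of per-token tails = tail of the flat spaced output
lemma pv_intercalate_tail (m : Int) : ∀ (ts : List (List Char)), (∀ t ∈ ts, t ≠ []) →
    List.intercalate [' '] (ts.map (fun t => (pvW m t 0).tail)) = (ts.flatMap (fun t => pvW m t 0)).tail := by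
  intro ts
  induction ts with
  | nil => intro _; simp [List.intercalate]
  | cons t rest ih =>
    intro h
    have ht : t ≠ [] := h t (by simp)
    cases rest with
    | nil => simp [List.intercalate]
    | cons t2 rl =>
      have ht2 : t2 ≠ [] := h t2 (by simp)
      rw [List.map_cons, List.map_cons, pv_intercalate_cons₂]
      have ih' := ih (fun x hx => h x (by simp [hx]))
      rw [List.map_cons] at ih'
      rw [ih']
      obtain ⟨wt, hwt⟩ : ∃ x, pvW m t 0 = ' ' :: x := ⟨_, pv_W_head m t ht⟩
      obtain ⟨fl, hfl⟩ : ∃ x, (t2 :: rl).flatMap (fun t => pvW m t 0) = ' ' :: x := by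
        refine ⟨(pvW m t2 0).tail ++ rl.flatMap (fun t => pvW m t 0), ?_⟩
        rw [List.flatMap_cons, pv_W_head m t2 ht2]
        simp
      rw [show (t :: t2 :: rl).flatMap (fun t => pvW m t 0)
          = pvW m t 0 ++ (t2 :: rl).flatMap (fun t => pvW m t 0) from by simp, hwt, hfl]
      simp

lemma pv_join_nil {α : Type} : ∀ (l : List (List α)), ([] : List α).intercalate l = l.flatten := by
  intro l
  induction l with
  | nil => rfl
  | cons a l ih =>
    cases l with
    | nil => simp [List.intercalate]
    | cons b rl =>
      rw [pv_intercalate_cons₂, ih]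
      simp

-- B reduced to the char machine
lemma pv_B_toList (text : Option String) (m : Int) :
    (wrap_long_tokens_py_alt text m).toList = (pvRecB m (text.getD "").toList 0).tail := by
  unfold wrap_long_tokens_py_alt
  rw [PySem.Str.toList_join]
  show PySem.Chars.join [] _ = _
  rw [PySem.Chars.join, pv_join_nil]
  exact pv_foldB_nil m (text.getD "").toList

-- A reduced to the char machine (on the natural domain 1 ≤ m)
lemma pv_A_toList (text : Option String) (m : Int) (hm : 1 ≤ m) :
    (wrap_long_tokens_py text m).toList = (pvRecB m (text.getD "").toList 0).tail := by
  unfold wrap_long_tokens_py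
  simp only []
  set str := text.getD "" with hstr
  set s := str.toList with hs
  set chunksS := fun (token : String) =>
    (PySem.List.pyRange 0 (PySem.Str.len token) m).map
      (fun i => PySem.Str.slice token (some i) (some (i + m))) with hchunks
  set fA := fun (token : String) =>
    if PySem.Str.len token ≤ m then token else PySem.Str.join " " (chunksS token) with hfA
  have hbodyA : (fun (out : List String) token =>
      if PySem.Str.len token ≤ m then out ++ [token]
      else out ++ [PySem.Str.join " " (chunksS token)])
      = fun out token => out ++ [fA token] := by
    funext out token
    exact (apply_ite (fun x => out ++ [x]) _ _ _).symm
  rw [hbodyA, PySem.List.foldl_append_singleton_eq_map fA (PySem.Str.split₀ str) []]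
  rw [PySem.Str.toList_join]
  simp only [List.nil_append]
  have htok_ne : ∀ t ∈ PySem.Chars.split₀ s, t ≠ [] :=
    pv_split0_go_ne_nil s [] [] (by simp)
  have hmap : List.map String.toList (List.map fA (PySem.Str.split₀ str))
      = (PySem.Chars.split₀ s).map (fun t => (pvW m t 0).tail) := by
    rw [PySem.Str.split₀, ← hs, List.map_map, List.map_map]
    apply List.map_congr_left
    intro t ht
    have htne : t ≠ [] := htok_ne t ht
    simp only [Function.comp_apply]
    have hlen : PySem.Str.len (String.ofList t) = ((t.length : Nat) : Int) := by
      rw [PySem.Str.len_eq, String.toList_ofList]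
    by_cases hle : ((t.length : Nat) : Int) ≤ m
    · rw [hfA]
      simp only [hlen, hle, if_pos, String.toList_ofList]
      have hW := pv_W_chunk m t [] htne hle
      simp only [List.append_nil, pvW] at hW
      rw [hW]
      simp
    · rw [hfA]
      simp only [hlen, hle, if_neg, if_false]
      rw [PySem.Str.toList_join, hchunks]
      show List.intercalate [' '] _ = _
      simp only [hlen, List.map_map]
      have hfun : (String.toList ∘ fun i => PySem.Str.slice (String.ofList t) (some i) (some (i + m)))
          = fun i => PySem.List.slice t (some i) (some (i + m)) := by
        funext i
        simp only [Function.comp_apply]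
        rw [PySem.Str.toList_slice, PySem.Chars.slice_eq_listSlice, String.toList_ofList]
      rw [hfun]
      exact pv_chunks_eq_tail_W m hm t.length t le_rfl htne
  rw [hmap]
  show List.intercalate [' '] _ = _
  rw [pv_intercalate_tail m (PySem.Chars.split₀ s) htok_ne]
  have hgo := pv_go_flat m s [] [] 0 (by intro u; simp [pvW])
  simp only [List.reverse_nil, List.flatMap_nil, List.isEmpty_nil, if_true,
    List.nil_append] at hgo
  rw [show PySem.Chars.split₀ s = PySem.Chars.split₀.go s [] [] from rfl, hgo]

-- ===== VERDICT (by name: the statement is the Claim_ definition above) =====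
theorem wrap_long_tokens_py_spec : Claim_equal_wrap_long_tokens_py := by
  intro text m _ hpre
  unfold Spec_wrap_long_tokens_py
  show wrap_long_tokens_py text m = wrap_long_tokens_py_alt text m
  apply String.toList_inj.mp
  rcases hpre with hm | hnil
  · rw [pv_A_toList text m hm, pv_B_toList text m]
  · -- token-free text: both sides are empty
    have htoksC : PySem.Chars.split₀ (text.getD "").toList = [] := by
      have := hnil
      rw [PySem.Str.split₀] at this
      simpa using this
    have hrec : pvRecB m (text.getD "").toList 0 = [] := by
      have hgo := pv_go_flat m (text.getD "").toList [] [] 0 (by intro u; simp [pvW])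
      simp only [List.reverse_nil, List.flatMap_nil, List.isEmpty_nil, if_true,
        List.nil_append] at hgo
      rw [show PySem.Chars.split₀.go (text.getD "").toList [] []
          = PySem.Chars.split₀ (text.getD "").toList from rfl, htoksC] at hgo
      simpa using hgo.symm
    rw [pv_B_toList text m, hrec]
    unfold wrap_long_tokens_py
    simp only []
    rw [hnil]
    simp [PySem.Str.toList_join, PySem.Chars.join, List.intercalate]
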